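-- pv_equiv track=rewrite | github.com/cellularmitosis/leopard.sh | utils/rcc.py | subject_file
-- ===== SOURCE A (Python) =====
-- CC_EXTS = [".c", ".cc", ".cpp"]
--
-- def copy_list(l):
--     return l[:]
--
-- def subject_file(argv):
--     # The "good enough for now" approach.
--     argv = copy_list(argv)
--     argv.reverse()
--     for (i, arg) in enumerate(argv):
--         if arg[-2:] in CC_EXTS:
--             real_i = len(argv) - i - 1
--             return (real_i, arg)
--     return None
-- ===== SOURCE B (Python) =====
-- def subject_file(argv):
--     # Single forward pass: remember the last element ending in ".c"
--     # (the original's `arg[-2:] in CC_EXTS` test can only ever match ".c").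
--     best = None
--     for i, arg in enumerate(argv):
--         if arg.endswith(".c"):
--             best = (i, arg)
--     return best
-- ===== Notes on version B (the rewrite author's own statement) =====
-- stated objective: simpler
-- what changed: One forward pass with enumerate keeping the last matching (index, value), instead of copying, reversing and scanning with reverse-index arithmetic; the 2-char-slice membership test is shown to be exactly endswith('.c').
import Mathlib
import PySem

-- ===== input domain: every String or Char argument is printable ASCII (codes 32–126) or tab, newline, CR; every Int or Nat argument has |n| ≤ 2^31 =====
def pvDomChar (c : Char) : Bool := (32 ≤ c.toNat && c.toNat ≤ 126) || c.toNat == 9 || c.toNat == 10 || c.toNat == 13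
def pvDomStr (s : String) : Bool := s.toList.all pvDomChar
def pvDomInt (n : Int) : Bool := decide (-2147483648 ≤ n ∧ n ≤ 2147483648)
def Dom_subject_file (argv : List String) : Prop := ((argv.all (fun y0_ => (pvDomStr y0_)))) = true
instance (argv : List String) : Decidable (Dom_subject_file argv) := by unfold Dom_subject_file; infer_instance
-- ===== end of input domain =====

-- B replaces A's copy/reverse/reverse-index scan by a single forward pass keeping the last match; same O(n) cost, simpler.

-- ===== PORT A =====
def CC_EXTS : List String := [".c", ".cc", ".cpp"]

def copy_list (l : List String) : List String := PySem.List.slice l none none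

def subjectLoopA (len : Int) : Int → List String → Option (Int × String)
  | _, [] => none
  | i, arg :: rest =>
    if PySem.Str.slice arg (some (-2)) none ∈ CC_EXTS then some (len - i - 1, arg)
    else subjectLoopA len (i + 1) rest

def subject_file (argv : List String) : Option (Int × String) :=
  let argv' := (copy_list argv).reverse
  subjectLoopA (argv'.length : Int) 0 argv'

-- ===== PORT B =====
def subjectLoopB : Int → Option (Int × String) → List String → Option (Int × String)
  | _, best, [] => best
  | i, best, arg :: rest =>
    subjectLoopB (i + 1) (if PySem.Str.endswith arg ".c" then some (i, arg) else best) rest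

def subject_file_alt (argv : List String) : Option (Int × String) :=
  subjectLoopB 0 none argv

-- ===== PRECONDITION & SPEC =====
def Spec_subject_file (argv : List String) (out : Option (Int × String)) : Prop := out = subject_file_alt argv
instance (argv : List String) (out : Option (Int × String)) : Decidable (Spec_subject_file argv out) := by unfold Spec_subject_file; infer_instance

-- ===== CLAIM (what is proved, stated in full; the proofs are below) =====
def Claim_equal_subject_file : Prop := ∀ (argv : List String), Dom_subject_file argv → Spec_subject_file argv (subject_file argv)

-- ===== LEMMAS AND PROOFS =====

-- A's test `arg[-2:] in CC_EXTS` can only ever match ".c", i.e. it is endswith(".c").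
theorem cond_eq (s : String) :
    (PySem.Str.slice s (some (-2)) none ∈ CC_EXTS) ↔ PySem.Str.endswith s ".c" = true := by
  have hsl : (PySem.Str.slice s (some (-2)) none).toList = s.toList.drop (s.toList.length - 2) := by
    rw [PySem.Str.toList_slice, PySem.Chars.slice_eq_listSlice,
        PySem.List.slice_from_neg_ofNat _ 2 (by omega)]
  have hlen : (s.toList.drop (s.toList.length - 2)).length ≤ 2 := by
    rw [List.length_drop]; omega
  have hdot : (".c" : String).toList = ['.', 'c'] := rfl
  have hes : PySem.Str.endswith s ".c" = true ↔ ['.', 'c'] <:+ s.toList := by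
    rw [PySem.Str.endswith_eq, hdot]; exact PySem.Chars.endswith_iff _ _
  constructor
  · intro hmem
    rw [hes]
    rcases (by simpa [CC_EXTS] using hmem :
        PySem.Str.slice s (some (-2)) none = ".c" ∨
        PySem.Str.slice s (some (-2)) none = ".cc" ∨
        PySem.Str.slice s (some (-2)) none = ".cpp") with h | h | h
    · have := String.ext_iff.mp h
      rw [hsl, hdot] at this
      rw [← this]
      exact List.drop_suffix _ _
    · have := congrArg List.length (String.ext_iff.mp h)
      rw [hsl] at this
      simp at this
      omega
    · have := congrArg List.length (String.ext_iff.mp h)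
      rw [hsl] at this
      simp at this
      omega
  · intro hend
    obtain ⟨u, hu⟩ := hes.mp hend
    have hdrop : s.toList.drop (s.toList.length - 2) = ['.', 'c'] := by
      rw [← hu, List.length_append]
      have : u.length + (['.', 'c'] : List Char).length - 2 = u.length := by simp
      rw [this, List.drop_left]
    have : PySem.Str.slice s (some (-2)) none = ".c" := by
      apply String.ext_iff.mpr
      rw [hsl, hdrop, hdot]
    simp [CC_EXTS, this]

-- first match while scanning forward (proof-side reference)
def firstMatch : List String → Option (Int × String)
  | [] => none
  | a :: l => if PySem.Str.endswith a ".c" then some (0, a)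
              else (firstMatch l).map (fun x => (x.1 + 1, x.2))

-- last match while scanning forward (proof-side reference)
def lastMatch : List String → Option (Int × String)
  | [] => none
  | a :: l =>
    match lastMatch l with
    | some x => some (x.1 + 1, x.2)
    | none => if PySem.Str.endswith a ".c" then some (0, a) else none

theorem loopA_eq (l : List String) (len : Int) : ∀ i : Int,
    subjectLoopA len i l = (firstMatch l).map (fun x => (len - i - x.1 - 1, x.2)) := by
  induction l with
  | nil => intro i; rfl
  | cons a l ih =>
    intro i
    simp only [subjectLoopA, firstMatch]
    by_cases h : PySem.Str.endswith a ".c" = true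
    · rw [if_pos ((cond_eq a).mpr h), if_pos h]; simp
    · rw [if_neg (fun hc => h ((cond_eq a).mp hc)), if_neg h, ih (i + 1)]
      cases hf : firstMatch l with
      | none => simp
      | some x => simp; omega

theorem loopB_eq (l : List String) : ∀ (i : Int) (b : Option (Int × String)),
    subjectLoopB i b l =
      (match lastMatch l with
       | some x => some (i + x.1, x.2)
       | none => b) := by
  induction l with
  | nil => intro i b; rfl
  | cons a l ih =>
    intro i b
    simp only [subjectLoopB, lastMatch]
    rw [ih]
    cases hl : lastMatch l with
    | none =>
      by_cases h : PySem.Str.endswith a ".c" = true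
      · rw [if_pos h, if_pos h]; simp
      · rw [if_neg h, if_neg h]
    | some x => simp; omega

theorem firstMatch_append (l₁ l₂ : List String) :
    firstMatch (l₁ ++ l₂) =
      (match firstMatch l₁ with
       | some x => some x
       | none => (firstMatch l₂).map (fun x => (x.1 + (l₁.length : Int), x.2))) := by
  induction l₁ with
  | nil =>
    cases hf : firstMatch l₂ with
    | none => simp [firstMatch, hf]
    | some x => simp [firstMatch, hf]
  | cons a l ih =>
    simp only [List.cons_append, firstMatch]
    by_cases h : PySem.Str.endswith a ".c" = true
    · rw [if_pos h, if_pos h]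
    · rw [if_neg h, if_neg h, ih]
      cases hf : firstMatch l with
      | some x => rfl
      | none =>
        cases hg : firstMatch l₂ with
        | none => simp
        | some x => simp; omega

theorem firstMatch_reverse (l : List String) :
    firstMatch l.reverse = (lastMatch l).map (fun x => ((l.length : Int) - 1 - x.1, x.2)) := by
  induction l with
  | nil => rfl
  | cons a l ih =>
    rw [List.reverse_cons, firstMatch_append, ih]
    cases hl : lastMatch l with
    | some x => simp [lastMatch, hl]; omega
    | none =>
      simp only [lastMatch, hl, Option.map_none]
      simp [firstMatch]

-- ===== VERDICT (by name: the statement is the Claim_ definition above) =====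
theorem subject_file_spec : Claim_equal_subject_file := by
  intro argv _
  show subject_file argv = subject_file_alt argv
  unfold subject_file subject_file_alt copy_list
  rw [PySem.List.slice_none_none]
  rw [loopA_eq, loopB_eq, firstMatch_reverse]
  cases hl : lastMatch argv with
  | none => rfl
  | some x =>
    obtain ⟨j, str⟩ := x
    simp only [Option.map_some, Option.some.injEq, Prod.mk.injEq, List.length_reverse]
    constructor
    · omega
    · trivial
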